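-- pv_equiv track=rewrite | github.com/sarraai/Telco_Cyber_Chat | src/telco_cyber_chat/webscraping/variot_scraper.py | parse_section
-- ===== SOURCE A (Python) =====
-- SECTION_HEADERS = {
--     "vendor:",
--     "product:",
--     "download:",
--     "vulnerability type:",
--     "cve reference:",
--     "security issue:",
--     "exploit:",
--     "network access:",
--     "severity:",
--     "disclosure timeline:",
--     "references:",
--     "tags:",
--     "credits:",
--     "sources:",
--     "description:",
-- }
--
-- def parse_section(text: str, header: str) -> str:
--     if not text:
--         return ""
--     lines = text.splitlines()
--     header_lc = header.lower().strip()
--     start = -1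
--     for i, line in enumerate(lines):
--         if line.lower().strip().startswith(header_lc):
--             start = i + 1
--             break
--     if start == -1:
--         return ""
--     end = len(lines)
--     for j in range(start, len(lines)):
--         l = lines[j].strip().lower()
--         if l.endswith(":") and (l in SECTION_HEADERS):
--             end = j
--             break
--     return "\n".join(lines[start:end]).strip()
-- ===== SOURCE B (Python) =====
-- SECTION_HEADERS = {
--     "vendor:",
--     "product:",
--     "download:",
--     "vulnerability type:",
--     "cve reference:",
--     "security issue:",
--     "exploit:",
--     "network access:",
--     "severity:",
--     "disclosure timeline:",
--     "references:",
--     "tags:",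
--     "credits:",
--     "sources:",
--     "description:",
-- }
--
-- def parse_section(text: str, header: str) -> str:
--     if not text:
--         return ""
--     header_lc = header.lower().strip()
--     collecting = False
--     buf = []
--     for line in text.splitlines():
--         if collecting:
--             l = line.strip().lower()
--             if l.endswith(":") and l in SECTION_HEADERS:
--                 break
--             buf.append(line)
--         elif line.lower().strip().startswith(header_lc):
--             collecting = True
--     if not collecting:
--         return ""
--     return "\n".join(buf).strip()
-- ===== Notes on version B (the rewrite author's own statement) =====
-- stated objective: alternative
-- what changed: A does two separate index-based scans (find the header index, then scan range(start,len) for the next section header) plus a list slice; B is a single structural pass over the lines with a collecting flag that buffers lines directly, no indices and no slicing.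
import Mathlib
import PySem

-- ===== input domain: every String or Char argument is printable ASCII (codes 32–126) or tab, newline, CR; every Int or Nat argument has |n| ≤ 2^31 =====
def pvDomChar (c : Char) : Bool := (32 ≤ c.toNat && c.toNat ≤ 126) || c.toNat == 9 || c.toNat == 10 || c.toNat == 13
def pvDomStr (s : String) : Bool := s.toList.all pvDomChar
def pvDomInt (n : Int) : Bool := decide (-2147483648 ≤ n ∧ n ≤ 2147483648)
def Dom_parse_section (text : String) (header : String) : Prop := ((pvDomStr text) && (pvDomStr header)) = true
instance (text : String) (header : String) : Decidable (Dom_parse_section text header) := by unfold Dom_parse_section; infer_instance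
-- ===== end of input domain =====

-- B replaces A's two index-based scans and slice with one structural pass keeping a
-- collecting state; same return value, no speed claim (objective: alternative).

-- ===== PORT A =====
def SECTION_HEADERS : PySem.Set String := PySem.Set.ofList
  ["vendor:", "product:", "download:", "vulnerability type:", "cve reference:",
   "security issue:", "exploit:", "network access:", "severity:",
   "disclosure timeline:", "references:", "tags:", "credits:", "sources:",
   "description:"]

-- line.lower().strip().startswith(header_lc)
def pvMatches (hlc : String) (line : String) : Bool :=
  PySem.Str.startswith (PySem.Str.strip (PySem.Str.lower line)) hlc

-- l = line.strip().lower(); l.endswith(":") and l in SECTION_HEADERS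
def pvStops (line : String) : Bool :=
  let l := PySem.Str.lower (PySem.Str.strip line)
  PySem.Str.endswith l ":" && PySem.Set.contains SECTION_HEADERS l

-- A's first loop: for i, line in enumerate(lines): if match: start = i+1; break
def pvFindStartA (hlc : String) : List String → Int → Int
  | [], _ => -1
  | line :: rest, i => if pvMatches hlc line then i + 1 else pvFindStartA hlc rest (i + 1)

-- A's second loop: for j in range(start, len(lines)): if stop(lines[j]): end = j; break
def pvFindEndA (lines : List String) : List Int → Int → Int
  | [], e => e
  | j :: js, e => if pvStops (PySem.List.pyGetD lines j "") then j else pvFindEndA lines js e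

def parse_section (text : String) (header : String) : String :=
  if text = "" then ""
  else
    let lines := PySem.Str.splitlines text
    let header_lc := PySem.Str.strip (PySem.Str.lower header)
    let start := pvFindStartA header_lc lines 0
    if start = -1 then ""
    else
      let e := pvFindEndA lines (PySem.List.pyRange start (lines.length : Int)) (lines.length : Int)
      PySem.Str.strip (PySem.Str.join "\n" (PySem.List.slice lines (some start) (some e)))

-- ===== PORT B =====
-- B's loop while collecting: append each line until a stop line (break)
def pvTakeB : List String → List String
  | [] => []
  | line :: rest => if pvStops line then [] else line :: pvTakeB rest

-- B's loop before collecting: none = header never found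
def pvSearchB (hlc : String) : List String → Option (List String)
  | [] => none
  | line :: rest => if pvMatches hlc line then some (pvTakeB rest) else pvSearchB hlc rest

def parse_section_alt (text : String) (header : String) : String :=
  if text = "" then ""
  else
    match pvSearchB (PySem.Str.strip (PySem.Str.lower header)) (PySem.Str.splitlines text) with
    | none => ""
    | some buf => PySem.Str.strip (PySem.Str.join "\n" buf)

-- ===== PRECONDITION & SPEC =====
def Spec_parse_section (text : String) (header : String) (out : String) : Prop := out = parse_section_alt text header
instance (text : String) (header : String) (out : String) : Decidable (Spec_parse_section text header out) := by unfold Spec_parse_section; infer_instance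

-- ===== CLAIM (what is proved, stated in full; the proofs are below) =====
def Claim_equal_parse_section : Prop := ∀ (text : String) (header : String), Dom_parse_section text header → Spec_parse_section text header (parse_section text header)

-- ===== LEMMAS AND PROOFS =====

-- A's end-loop result is bounded below by every candidate index / the default.
theorem pvFindEndA_lb (lines : List String) (c : Int) :
    ∀ (js : List Int) (e : Int), (∀ j ∈ js, c ≤ j) → c ≤ e →
      c ≤ pvFindEndA lines js e := by
  intro js
  induction js with
  | nil => intro e _ he; simpa [pvFindEndA] using he
  | cons j js ih =>
      intro e hjs he
      simp only [pvFindEndA]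
      split
      · exact hjs j (by simp)
      · exact ih e (fun x hx => hjs x (by simp [hx])) he

-- A's "find end then slice" over range(s, len) equals B's structural collect on drop s.
theorem pvEnd_slice (lines : List String) :
    ∀ (n s : Nat), lines.length = s + n →
      PySem.List.slice lines (some (s : Int))
        (some (pvFindEndA lines (PySem.List.pyRange (s : Int) (lines.length : Int)) (lines.length : Int)))
        = pvTakeB (lines.drop s) := by
  intro n
  induction n with
  | zero =>
      intro s hs
      have hr : PySem.List.pyRange (s : Int) (lines.length : Int) = [] := by
        simp [PySem.List.pyRange, hs]
      have hd : lines.drop s = [] := List.drop_eq_nil_of_le (by omega)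
      rw [hr, hd]
      simp [pvFindEndA, PySem.List.slice_natCast, hd, pvTakeB]
  | succ n ih =>
      intro s hs
      have hsn : s < lines.length := by omega
      have hlt : (s : Int) < (lines.length : Int) := by exact_mod_cast hsn
      rw [PySem.List.pyRange_one_cons hlt]
      have hget : PySem.List.pyGetD lines (s : Int) "" = lines[s] := by
        rw [PySem.List.pyGetD_natCast]
        simp [List.getD_eq_getElem?_getD, hsn]
      have hdrop : lines.drop s = lines[s] :: lines.drop (s + 1) :=
        List.drop_eq_getElem_cons hsn
      simp only [pvFindEndA, hget]
      by_cases hstop : pvStops lines[s]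
      · rw [if_pos hstop, hdrop, pvTakeB, if_pos hstop]
        rw [PySem.List.slice_natCast]
        simp
      · rw [if_neg hstop]
        have hcast : ((s : Int) + 1) = ((s + 1 : Nat) : Int) := by push_cast; ring
        have hrest := ih (s + 1) (by omega)
        rw [← hcast] at hrest
        set e := pvFindEndA lines (PySem.List.pyRange ((s : Int) + 1) (lines.length : Int)) (lines.length : Int) with he
        have hle : ((s : Int) + 1) ≤ e :=
          pvFindEndA_lb lines ((s : Int) + 1) _ _
            (fun j hj => (PySem.List.mem_pyRange_one.mp hj).1)
            (by exact_mod_cast (by omega : s + 1 ≤ lines.length))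
        have h0 : (0 : Int) ≤ (s : Int) := by positivity
        have h0e : (0 : Int) ≤ e := by omega
        rw [PySem.List.slice_toNat _ h0 h0e]
        rw [PySem.List.slice_toNat _ (by omega) h0e] at hrest
        have hsnat : ((s : Int)).toNat = s := by simp
        have hsnat1 : ((s : Int) + 1).toNat = s + 1 := by omega
        rw [hsnat]
        rw [hsnat1] at hrest
        rw [hdrop, pvTakeB, if_neg hstop]
        rw [show e.toNat - s = (e.toNat - (s + 1)) + 1 by omega]
        rw [List.take_succ_cons, hrest]

-- A's start-loop computed via findIdx?.
theorem pvFindStartA_char (hlc : String) :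
    ∀ (lines : List String) (i : Int),
      pvFindStartA hlc lines i =
        match lines.findIdx? (pvMatches hlc) with
        | none => -1
        | some k => i + k + 1 := by
  intro lines
  induction lines with
  | nil => intro i; simp [pvFindStartA]
  | cons l rest ih =>
      intro i
      simp only [pvFindStartA, List.findIdx?_cons]
      by_cases h : pvMatches hlc l
      · simp [h]
      · simp only [h, ih (i + 1)]
        cases hk : rest.findIdx? (pvMatches hlc) with
        | none => simp
        | some k => simp; ring

-- B's search computed via findIdx?.
theorem pvSearchB_char (hlc : String) :
    ∀ (lines : List String),
      pvSearchB hlc lines =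
        (lines.findIdx? (pvMatches hlc)).map (fun k => pvTakeB (lines.drop (k + 1))) := by
  intro lines
  induction lines with
  | nil => simp [pvSearchB]
  | cons l rest ih =>
      simp only [pvSearchB, List.findIdx?_cons]
      by_cases h : pvMatches hlc l
      · simp [h]
      · simp only [h, ih]
        cases hk : rest.findIdx? (pvMatches hlc) with
        | none => simp
        | some k => simp

-- ===== VERDICT (by name: the statement is the Claim_ definition above) =====
theorem parse_section_spec : Claim_equal_parse_section := by
  intro text header _
  unfold Spec_parse_section parse_section parse_section_alt
  by_cases ht : text = ""
  · simp [ht]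
  · simp only [ht, if_false]
    set lines := PySem.Str.splitlines text
    set hlc := PySem.Str.strip (PySem.Str.lower header)
    rw [pvFindStartA_char, pvSearchB_char]
    cases hk : lines.findIdx? (pvMatches hlc) with
    | none => simp
    | some k =>
        have hklen : k < lines.length := (List.findIdx?_eq_some_iff_findIdx_eq.mp hk).1
        simp only [Option.map_some]
        have hne : (0 : Int) + (k : Int) + 1 ≠ -1 := by omega
        simp only [hne, if_false]
        have hcast : (0 : Int) + (k : Int) + 1 = ((k + 1 : Nat) : Int) := by push_cast; ring
        rw [hcast, pvEnd_slice lines (lines.length - (k + 1)) (k + 1) (by omega)]
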